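-- pv_equiv track=rewrite | github.com/openai/transformer-debugger | neuron_explainer/activations/attention_utils.py | get_attended_to_sequence_length_per_sequence_token
-- ===== SOURCE A (Python) =====
-- def get_attended_to_sequence_length_per_sequence_token(
--     num_sequence_tokens: int, max_num_attended_to_sequence_tokens: int
-- ) -> list[int]:
--     # given a num_sequence_tokens and a max_num_attended_to_sequence_tokens, return a list of length num_sequence_tokens
--     # where the ith element is the length of the attended to sequence for the ith sequence token.
--     # The length of the attended to sequence starts at 1, increases up to max_num_attended_to_sequence_tokens, by 1 with each
--     # token, and then stays at max_num_attended_to_sequence_tokens for the remainder of the sequence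
--     assert num_sequence_tokens >= max_num_attended_to_sequence_tokens
--     attended_to_sequence_lengths = list(range(1, max_num_attended_to_sequence_tokens + 1))
--     if num_sequence_tokens > max_num_attended_to_sequence_tokens:
--         attended_to_sequence_lengths.extend(
--             [
--                 max_num_attended_to_sequence_tokens
--                 for _ in range(num_sequence_tokens - max_num_attended_to_sequence_tokens)
--             ]
--         )
--     return attended_to_sequence_lengths
-- ===== SOURCE B (Python) =====
-- def get_attended_to_sequence_length_per_sequence_token(
--     num_sequence_tokens: int, max_num_attended_to_sequence_tokens: int
-- ) -> list[int]:
--     assert num_sequence_tokens >= max_num_attended_to_sequence_tokens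
--     # single pass with a saturating counter: the attended-to length grows by 1
--     # per token until it reaches the cap, then stays there
--     lengths = []
--     total = 0
--     for _ in range(num_sequence_tokens):
--         if total < max_num_attended_to_sequence_tokens:
--             total += 1
--         lengths.append(total)
--     return lengths
-- ===== Notes on version B (the rewrite author's own statement) =====
-- stated objective: alternative
-- what changed: Replaces A's two-segment assembly (a precomputed ramp range conditionally extended with a constant fill) with a single stateful pass maintaining a saturating counter that increments until it reaches the cap and is appended each step.
-- outside the precondition, e.g. on get_attended_to_sequence_length_per_sequence_token(4, -7): A returns [-7, -7, -7, -7, -7, -7, -7, -7, -7, -7, -7], B returns [0, 0, 0, 0]; on get_attended_to_sequence_length_per_sequence_token(-3, -3): A returns [], B returns []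
import Mathlib
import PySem

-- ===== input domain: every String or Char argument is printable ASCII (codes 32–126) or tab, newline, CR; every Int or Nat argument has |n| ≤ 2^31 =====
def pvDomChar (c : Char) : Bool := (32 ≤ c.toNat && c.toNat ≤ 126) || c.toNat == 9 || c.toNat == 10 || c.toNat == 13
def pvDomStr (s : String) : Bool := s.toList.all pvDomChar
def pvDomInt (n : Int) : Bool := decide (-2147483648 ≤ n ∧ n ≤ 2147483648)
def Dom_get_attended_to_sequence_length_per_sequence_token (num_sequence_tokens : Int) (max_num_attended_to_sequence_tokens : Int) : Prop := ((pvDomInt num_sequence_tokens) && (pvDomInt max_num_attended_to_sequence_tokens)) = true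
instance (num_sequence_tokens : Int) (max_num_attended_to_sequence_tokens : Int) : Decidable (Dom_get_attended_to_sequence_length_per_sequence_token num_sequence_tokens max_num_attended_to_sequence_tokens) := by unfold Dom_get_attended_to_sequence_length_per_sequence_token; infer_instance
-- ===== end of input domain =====

-- B replaces A's two-segment assembly (ramp range + conditional constant fill) with a single
-- stateful pass maintaining a saturating counter; equal return values on 0 ≤ max ≤ num.

-- ===== PORT A =====
def get_attended_to_sequence_length_per_sequence_token (num_sequence_tokens : Int) (max_num_attended_to_sequence_tokens : Int) : List Int :=
  let attended_to_sequence_lengths := PySem.List.pyRange 1 (max_num_attended_to_sequence_tokens + 1) 1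
  if num_sequence_tokens > max_num_attended_to_sequence_tokens then
    attended_to_sequence_lengths ++
      (PySem.List.pyRange 0 (num_sequence_tokens - max_num_attended_to_sequence_tokens) 1).map
        (fun _ => max_num_attended_to_sequence_tokens)
  else
    attended_to_sequence_lengths

-- ===== PORT B =====
def get_attended_to_sequence_length_per_sequence_token_alt (num_sequence_tokens : Int) (max_num_attended_to_sequence_tokens : Int) : List Int :=
  ((PySem.List.pyRange 0 num_sequence_tokens 1).foldl
    (fun (s : Int × List Int) _ =>
      let total := if s.1 < max_num_attended_to_sequence_tokens then s.1 + 1 else s.1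
      (total, s.2 ++ [total]))
    (0, [])).2

-- ===== PRECONDITION & SPEC =====
-- Pre_ = A's assert (max ≤ num; A raises AssertionError otherwise) plus 0 ≤ max: a negative
-- attended-to length is outside the function's natural domain (the lengths ramp 1..max), and
-- there A's extend-only assembly yields a list of length num-max rather than num.
def Pre_get_attended_to_sequence_length_per_sequence_token (num_sequence_tokens : Int) (max_num_attended_to_sequence_tokens : Int) : Prop :=
  max_num_attended_to_sequence_tokens ≤ num_sequence_tokens ∧ 0 ≤ max_num_attended_to_sequence_tokens
instance (num_sequence_tokens : Int) (max_num_attended_to_sequence_tokens : Int) : Decidable (Pre_get_attended_to_sequence_length_per_sequence_token num_sequence_tokens max_num_attended_to_sequence_tokens) := by unfold Pre_get_attended_to_sequence_length_per_sequence_token; infer_instance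
def pvWitness_get_attended_to_sequence_length_per_sequence_token : Int × Int := (5, 3)

def Spec_get_attended_to_sequence_length_per_sequence_token (num_sequence_tokens : Int) (max_num_attended_to_sequence_tokens : Int) (out : List Int) : Prop := out = get_attended_to_sequence_length_per_sequence_token_alt num_sequence_tokens max_num_attended_to_sequence_tokens
instance (num_sequence_tokens : Int) (max_num_attended_to_sequence_tokens : Int) (out : List Int) : Decidable (Spec_get_attended_to_sequence_length_per_sequence_token num_sequence_tokens max_num_attended_to_sequence_tokens out) := by unfold Spec_get_attended_to_sequence_length_per_sequence_token; infer_instance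

-- ===== CLAIM (what is proved, stated in full; the proofs are below) =====
def Claim_equal_get_attended_to_sequence_length_per_sequence_token : Prop := ∀ (num_sequence_tokens : Int) (max_num_attended_to_sequence_tokens : Int), Dom_get_attended_to_sequence_length_per_sequence_token num_sequence_tokens max_num_attended_to_sequence_tokens → Pre_get_attended_to_sequence_length_per_sequence_token num_sequence_tokens max_num_attended_to_sequence_tokens → Spec_get_attended_to_sequence_length_per_sequence_token num_sequence_tokens max_num_attended_to_sequence_tokens (get_attended_to_sequence_length_per_sequence_token num_sequence_tokens max_num_attended_to_sequence_tokens)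

-- ===== LEMMAS AND PROOFS =====

-- B's fold invariant: starting the saturating counter at min j max, the pass appends
-- exactly the clamped values min (j+1+i) max, one per element traversed.
lemma sat_fold_spec (max : Int) (l : List Int) :
    ∀ (j t : Int) (acc : List Int), t = min j max →
      ((l.foldl
        (fun (s : Int × List Int) _ =>
          let total := if s.1 < max then s.1 + 1 else s.1
          (total, s.2 ++ [total]))
        (t, acc)).2
      = acc ++ (List.range l.length).map (fun (i : Nat) => min (j + 1 + (i : Int)) max)) := by
  induction l with
  | nil => intro j t acc ht; simp
  | cons x xs ih =>
    intro j t acc ht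
    have hstep : (if t < max then t + 1 else t) = min (j + 1) max := by
      rcases le_total max j with h | h
      · simp [ht, min_eq_right h, min_eq_right (by omega : max ≤ j + 1)]
      · rw [ht, min_eq_left h]
        by_cases hj : j < max
        · simp [hj]
        · simp [hj]; omega
    simp only [List.foldl_cons, hstep, List.length_cons]
    rw [ih (j + 1) (min (j + 1) max) (acc ++ [min (j + 1) max]) rfl,
        List.range_succ_eq_map, List.map_cons, List.map_map, List.append_assoc,
        List.singleton_append]
    congr 1
    congr 1
    · norm_num
    · apply List.map_congr_left
      intro i _
      simp only [Function.comp_apply]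
      push_cast
      ring_nf

-- A's two-segment value equals the pointwise clamp list, for 0 ≤ max ≤ num
lemma ramp_fill_eq_clamp (num max : Int) (h0 : 0 ≤ max) (h : max ≤ num) :
    get_attended_to_sequence_length_per_sequence_token num max
      = (List.range (num.toNat)).map (fun (i : Nat) => min (1 + (i : Int)) max) := by
  unfold get_attended_to_sequence_length_per_sequence_token
  by_cases hgt : num > max
  · simp only [hgt, if_pos]
    apply List.ext_getElem
    · simp [PySem.List.length_pyRange_one]; omega
    · intro k h1 h2
      simp only [List.getElem_append, List.getElem_map, List.getElem_range,
        PySem.List.getElem_pyRange_one, PySem.List.length_pyRange_one] at *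
      split_ifs with hk
      · omega
      · omega
  · have hnm : num = max := le_antisymm (not_lt.mp hgt) h
    rw [if_neg hgt]
    apply List.ext_getElem
    · simp [PySem.List.length_pyRange_one]; omega
    · intro k h1 h2
      simp only [List.getElem_map, List.getElem_range, PySem.List.getElem_pyRange_one] at *
      rw [PySem.List.length_pyRange_one] at h1
      omega

-- ===== VERDICT (by name: the statement is the Claim_ definition above) =====
theorem get_attended_to_sequence_length_per_sequence_token_spec : Claim_equal_get_attended_to_sequence_length_per_sequence_token := by
  intro num max _ hpre
  obtain ⟨hle, h0⟩ := hpre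
  unfold Spec_get_attended_to_sequence_length_per_sequence_token
  unfold get_attended_to_sequence_length_per_sequence_token_alt
  rw [ramp_fill_eq_clamp num max h0 hle,
      sat_fold_spec max (PySem.List.pyRange 0 num 1) 0 0 [] (min_eq_left h0).symm]
  simp only [List.nil_append, PySem.List.length_pyRange_one]
  have hnum : (num - 0).toNat = num.toNat := by omega
  rw [hnum]
  apply List.map_congr_left
  intro i _
  ring_nf
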